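-- pv_equiv track=rewrite | github.com/darshbs/py-practice | z_p2Dummy.py | totalCount
-- ===== SOURCE A (Python) =====
-- def totalCount(n: int) -> int:
--     """
--     Finds the sum of all valid x values where:
--     sum(n) = xorSum(n, x)
--     """
--     total_sum = (n * (n + 1)) // 2  # Compute sum of first 'n' numbers
--
--     valid_x_sum = 0
--
--     for x in range(n + 1):  # Check all x values
--         xor_sum = sum(i ^ x for i in range(n + 1))  # Compute XOR sum
--
--         if xor_sum == total_sum:  # If condition is met, add x
--             valid_x_sum += x
--
--     return valid_x_sum
-- ===== SOURCE B (Python) =====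
-- def totalCount(n: int) -> int:
--     """
--     Finds the sum of all valid x values where:
--     sum(n) = xorSum(n, x)
--
--     Uses sum(i^x) = sum(i) + (n+1)*x - 2*sum(i&x): x is valid iff
--     (n+1)*x == 2*sum(i&x), with sum(i&x) read off per-bit counts
--     collected in one pass.
--     """
--     m = n + 1
--     bits = max(m.bit_length(), 1)
--     pows = [2 ** b for b in range(bits)]
--     cnt = [0] * bits
--     for i in range(m):
--         cnt = [c + (i // p) % 2 for c, p in zip(cnt, pows)]
--     valid_x_sum = 0
--     for x in range(m):
--         s = sum((x // p) % 2 * (c * p) for c, p in zip(cnt, pows))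
--         if m * x == 2 * s:
--             valid_x_sum += x
--     return valid_x_sum
-- ===== Notes on version B (the rewrite author's own statement) =====
-- stated objective: faster
-- what changed: Replaces the O(n) inner xor-sum per candidate x by the identity sum(i^x)=sum(i)+(n+1)x-2*sum(i&x): one pass collects per-bit set counts of 0..n, then each x is tested in O(log n) via those counts.
import Mathlib
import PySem

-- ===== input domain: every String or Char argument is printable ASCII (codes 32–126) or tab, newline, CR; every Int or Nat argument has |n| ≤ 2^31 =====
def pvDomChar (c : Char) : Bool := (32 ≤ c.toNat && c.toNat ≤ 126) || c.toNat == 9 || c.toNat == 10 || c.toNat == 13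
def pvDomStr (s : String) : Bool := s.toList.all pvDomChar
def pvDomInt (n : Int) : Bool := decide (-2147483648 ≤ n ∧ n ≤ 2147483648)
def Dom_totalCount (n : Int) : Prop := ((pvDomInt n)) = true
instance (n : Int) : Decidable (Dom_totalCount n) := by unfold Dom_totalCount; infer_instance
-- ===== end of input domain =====

-- B replaces A's O(n) inner xor-sum per candidate x by per-bit set counts of 0..n
-- collected in one pass (identity sum(i^x) = sum(i) + (n+1)x - 2*sum(i&x)): objective faster.

-- ===== PORT A =====
def totalCount (n : Int) : Int :=
  let total_sum := PySem.Int.floordiv (n * (n + 1)) 2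
  (PySem.List.pyRange 0 (n + 1) 1).foldl (fun valid_x_sum x =>
    let xor_sum := (PySem.List.pyRange 0 (n + 1) 1).foldl
      (fun s i => s + PySem.Int.bxor i x) 0
    if xor_sum == total_sum then valid_x_sum + x else valid_x_sum) 0

-- ===== PORT B =====
-- b ranges over range(bits), so b ≥ 0: Python's 2 ** b is (2 : Int) ^ b.toNat, exact here.
def totalCount_alt (n : Int) : Int :=
  let m := n + 1
  let bits : Nat := max (PySem.Int.bitLength m) 1
  let pows : List Int := (PySem.List.pyRange 0 (bits : Int) 1).map (fun b => (2 : Int) ^ b.toNat)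
  let cnt0 : List Int := List.replicate bits 0
  let cnt := (PySem.List.pyRange 0 m 1).foldl
    (fun cnt i => (cnt.zip pows).map
      (fun cp => cp.1 + PySem.Int.mod (PySem.Int.floordiv i cp.2) 2)) cnt0
  (PySem.List.pyRange 0 m 1).foldl (fun valid_x_sum x =>
    let s := (cnt.zip pows).foldl
      (fun s cp => s + PySem.Int.mod (PySem.Int.floordiv x cp.2) 2 * (cp.1 * cp.2)) 0
    if m * x == 2 * s then valid_x_sum + x else valid_x_sum) 0

-- ===== PRECONDITION & SPEC =====
def Spec_totalCount (n : Int) (out : Int) : Prop := out = totalCount_alt n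
instance (n : Int) (out : Int) : Decidable (Spec_totalCount n out) := by unfold Spec_totalCount; infer_instance

-- ===== CLAIM (what is proved, stated in full; the proofs are below) =====
def Claim_equal_totalCount : Prop := ∀ (n : Int), Dom_totalCount n → Spec_totalCount n (totalCount n)

-- ===== LEMMAS AND PROOFS =====

/-- bit `b` of `y`. -/
def pvBit (y b : Nat) : Nat := y / 2 ^ b % 2

def pvBitSum (B y : Nat) : Nat := ((List.range B).map (fun b => 2 ^ b * pvBit y b)).sum

def pvCnt (M b : Nat) : Nat := ((List.range M).map (fun i => pvBit i b)).sum

def pvAndSum (M X : Nat) : Nat := ((List.range M).map (fun i => i &&& X)).sum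

def pvXorSum (M X : Nat) : Nat := ((List.range M).map (fun i => i ^^^ X)).sum

def pvIdSum (M : Nat) : Nat := ((List.range M).map (fun i => i)).sum

theorem pvListSum_range (f : Nat → Nat) (n : Nat) :
    ((List.range n).map f).sum = ∑ i ∈ Finset.range n, f i := rfl

theorem pvBit_testBit (y b : Nat) : pvBit y b = (y.testBit b).toNat := by
  have h : y / 2 ^ b % 2 < 2 := Nat.mod_lt _ (by norm_num)
  rw [Nat.testBit_eq_decide_div_mod_eq]
  unfold pvBit
  cases h1 : y / 2 ^ b % 2 with
  | zero => simp
  | succ m => have hm : m = 0 := by omega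
              subst hm; simp

theorem pvBitSum_eq_mod (B y : Nat) : pvBitSum B y = y % 2 ^ B := by
  induction B with
  | zero => simp [pvBitSum, Nat.mod_one]
  | succ B ih =>
    unfold pvBitSum at *
    rw [List.range_succ, List.map_append, List.sum_append, ih]
    have : (2 : Nat) ^ (B + 1) = 2 ^ B * 2 := by ring
    rw [this, Nat.mod_mul]
    simp [pvBit]

theorem pvBit_add (a b k : Nat) :
    pvBit a k + pvBit b k = pvBit (a ^^^ b) k + 2 * pvBit (a &&& b) k := by
  simp only [pvBit_testBit, Nat.testBit_xor, Nat.testBit_and]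
  cases a.testBit k <;> cases b.testBit k <;> rfl

theorem pvBit_and (a b k : Nat) : pvBit (a &&& b) k = pvBit a k * pvBit b k := by
  simp only [pvBit_testBit, Nat.testBit_and]
  cases a.testBit k <;> cases b.testBit k <;> rfl

/-- Python's per-element identity `i + x = (i ^ x) + 2 * (i & x)`. -/
theorem pv_add_eq_xor_add_two_and (a b : Nat) : a + b = (a ^^^ b) + 2 * (a &&& b) := by
  set B := a + b + 1 with hB
  have hab : a + b < 2 ^ (a + b) := Nat.lt_two_pow_self
  have hpow : (2 : Nat) ^ (a + b) ≤ 2 ^ B := Nat.pow_le_pow_right (by norm_num) (by omega)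
  have ha : a < 2 ^ B := by omega
  have hb : b < 2 ^ B := by omega
  have hx : a ^^^ b < 2 ^ B := Nat.xor_lt_two_pow ha hb
  have hn : a &&& b < 2 ^ B := lt_of_le_of_lt Nat.and_le_left ha
  calc a + b = a % 2 ^ B + b % 2 ^ B := by
        rw [Nat.mod_eq_of_lt ha, Nat.mod_eq_of_lt hb]
    _ = pvBitSum B a + pvBitSum B b := by rw [pvBitSum_eq_mod, pvBitSum_eq_mod]
    _ = ((List.range B).map (fun k => 2 ^ k * pvBit a k + 2 ^ k * pvBit b k)).sum := by
        unfold pvBitSum; rw [List.sum_map_add]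
    _ = ((List.range B).map (fun k =>
          2 ^ k * pvBit (a ^^^ b) k + 2 * (2 ^ k * pvBit (a &&& b) k))).sum := by
        refine congrArg _ (List.map_congr_left fun k _ => ?_)
        calc 2 ^ k * pvBit a k + 2 ^ k * pvBit b k
            = 2 ^ k * (pvBit a k + pvBit b k) := by ring
          _ = 2 ^ k * (pvBit (a ^^^ b) k + 2 * pvBit (a &&& b) k) := by rw [pvBit_add]
          _ = 2 ^ k * pvBit (a ^^^ b) k + 2 * (2 ^ k * pvBit (a &&& b) k) := by ring
    _ = pvBitSum B (a ^^^ b) + 2 * pvBitSum B (a &&& b) := by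
        unfold pvBitSum
        rw [List.sum_map_add, List.sum_map_mul_left]
    _ = (a ^^^ b) + 2 * (a &&& b) := by
        rw [pvBitSum_eq_mod, pvBitSum_eq_mod, Nat.mod_eq_of_lt hx, Nat.mod_eq_of_lt hn]

/-- reading `sum(i & x)` off the per-bit counts. -/
theorem pvAndSum_from_counts (B M X : Nat) (hM : M ≤ 2 ^ B) :
    ((List.range B).map (fun b => pvBit X b * (pvCnt M b * 2 ^ b))).sum = pvAndSum M X := by
  unfold pvAndSum pvCnt
  rw [pvListSum_range, pvListSum_range]
  calc ∑ b ∈ Finset.range B, pvBit X b * ((((List.range M).map (fun i => pvBit i b)).sum) * 2 ^ b)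
      = ∑ b ∈ Finset.range B, ∑ i ∈ Finset.range M, 2 ^ b * pvBit (i &&& X) b := by
        refine Finset.sum_congr rfl fun b _ => ?_
        rw [pvListSum_range, Finset.sum_mul, Finset.mul_sum]
        refine Finset.sum_congr rfl fun i _ => ?_
        rw [pvBit_and]
        ring
    _ = ∑ i ∈ Finset.range M, ∑ b ∈ Finset.range B, 2 ^ b * pvBit (i &&& X) b :=
        Finset.sum_comm
    _ = ∑ i ∈ Finset.range M, (i &&& X) := by
        refine Finset.sum_congr rfl fun i hi => ?_
        rw [← pvListSum_range, ← pvBitSum]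
        rw [pvBitSum_eq_mod]
        have hi' : i < M := Finset.mem_range.mp hi
        exact Nat.mod_eq_of_lt (lt_of_le_of_lt Nat.and_le_left (by omega))

theorem pvXorSum_identity (M X : Nat) :
    pvXorSum M X + 2 * pvAndSum M X = pvIdSum M + M * X := by
  unfold pvXorSum pvAndSum pvIdSum
  rw [pvListSum_range, pvListSum_range, pvListSum_range]
  have h : ∑ i ∈ Finset.range M, (i ^^^ X) + 2 * ∑ i ∈ Finset.range M, (i &&& X)
      = ∑ i ∈ Finset.range M, ((i ^^^ X) + 2 * (i &&& X)) := by
    rw [Finset.sum_add_distrib, Finset.mul_sum]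
  rw [h]
  have h2 : ∑ i ∈ Finset.range M, ((i ^^^ X) + 2 * (i &&& X))
      = ∑ i ∈ Finset.range M, (i + X) := by
    exact Finset.sum_congr rfl fun i _ => (pv_add_eq_xor_add_two_and i X).symm
  rw [h2, Finset.sum_add_distrib, Finset.sum_const, Finset.card_range, smul_eq_mul]

theorem pvGauss (N : Nat) : PySem.Int.floordiv ((N : Int) * (((N + 1 : Nat) : Int))) 2
    = ((pvIdSum (N + 1) : Nat) : Int) := by
  have hc : ((N : Int) * (((N + 1 : Nat) : Int))) = ((N * (N + 1) : Nat) : Int) := by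
    push_cast; ring
  rw [hc, show ((2 : Int) = ((2 : Nat) : Int)) from rfl, PySem.Int.floordiv_natCast]
  congr 1
  have hg : (∑ i ∈ Finset.range (N + 1), i) * 2 = (N + 1) * N :=
    Finset.sum_range_id_mul_two (N + 1)
  unfold pvIdSum
  rw [pvListSum_range]
  have hr : N * (N + 1) = (N + 1) * N := by ring
  omega

-- == evaluation of the pieces of the two ports ==

theorem pvRange_natCast (M : Nat) :
    PySem.List.pyRange 0 (M : Int) 1 = (List.range M).map (fun k : Nat => (k : Int)) := by
  rw [PySem.List.pyRange_one, sub_zero, Int.toNat_natCast]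
  exact List.map_congr_left fun k _ => zero_add _

theorem pvInnerA (M X : Nat) :
    (PySem.List.pyRange 0 (M : Int) 1).foldl (fun s i => s + PySem.Int.bxor i (X : Int)) 0
      = ((pvXorSum M X : Nat) : Int) := by
  rw [pvRange_natCast, PySem.List.foldl_add, zero_add, List.map_map]
  unfold pvXorSum
  rw [Nat.cast_list_sum, List.map_map]
  refine congrArg _ (List.map_congr_left fun k _ => ?_)
  simp

theorem pvPows (B : Nat) :
    ((PySem.List.pyRange 0 (B : Int) 1).map (fun b => (2 : Int) ^ b.toNat))
      = (List.range B).map (fun b => ((2 ^ b : Nat) : Int)) := by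
  rw [pvRange_natCast, List.map_map]
  refine List.map_congr_left fun k _ => ?_
  simp

theorem pvCnt_succ (M b : Nat) : pvCnt (M + 1) b = pvCnt M b + pvBit M b := by
  unfold pvCnt
  rw [List.range_succ, List.map_append, List.sum_append]
  simp

theorem pvCntEval (B : Nat) (M : Nat) :
    (PySem.List.pyRange 0 (M : Int) 1).foldl
      (fun cnt i => (cnt.zip ((List.range B).map (fun b => ((2 ^ b : Nat) : Int)))).map
        (fun cp => cp.1 + PySem.Int.mod (PySem.Int.floordiv i cp.2) 2))
      (List.replicate B 0)
    = (List.range B).map (fun b => ((pvCnt M b : Nat) : Int)) := by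
  induction M with
  | zero =>
    rw [PySem.List.pyRange_one_eq_nil (by norm_num)]
    simp [pvCnt, List.map_const']
  | succ M ih =>
    have hc : ((M + 1 : Nat) : Int) = (M : Int) + 1 := by push_cast; ring
    rw [hc, PySem.List.pyRange_one_succ_right (by positivity), List.foldl_append, ih]
    simp only [List.foldl_cons, List.foldl_nil, List.zip_map', List.map_map]
    refine List.map_congr_left fun b _ => ?_
    simp only [Function.comp_def]
    rw [show ((2 : Int) = ((2 : Nat) : Int)) from rfl, PySem.Int.floordiv_natCast,
      PySem.Int.mod_natCast, pvCnt_succ]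
    push_cast
    rfl

theorem pvInnerB (B M X : Nat) :
    (((List.range B).map (fun b => ((pvCnt M b : Nat) : Int))).zip
        ((List.range B).map (fun b => ((2 ^ b : Nat) : Int)))).foldl
      (fun s cp => s + PySem.Int.mod (PySem.Int.floordiv (X : Int) cp.2) 2 * (cp.1 * cp.2)) 0
    = (((List.range B).map (fun b => pvBit X b * (pvCnt M b * 2 ^ b))).sum : Int) := by
  rw [List.zip_map', PySem.List.foldl_add, zero_add, List.map_map, Nat.cast_list_sum,
    List.map_map]
  refine congrArg _ (List.map_congr_left fun b _ => ?_)
  simp only [Function.comp_def]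
  rw [show ((2 : Int) = ((2 : Nat) : Int)) from rfl, PySem.Int.floordiv_natCast,
    PySem.Int.mod_natCast]
  push_cast [pvBit]
  ring

-- ===== VERDICT (by name: the statement is the Claim_ definition above) =====
theorem totalCount_spec : Claim_equal_totalCount := by
  intro n _
  unfold Spec_totalCount totalCount totalCount_alt
  dsimp only
  by_cases hneg : n + 1 ≤ 0
  · rw [PySem.List.pyRange_one_eq_nil hneg]
    rfl
  · have h0 : 0 ≤ n := by omega
    obtain ⟨N, rfl⟩ := Int.eq_ofNat_of_zero_le h0
    have hMc : ((N : Int) + 1) = ((N + 1 : Nat) : Int) := by push_cast; ring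
    rw [hMc]
    have hMB : N + 1 ≤ 2 ^ max (PySem.Int.bitLength ((N + 1 : Nat) : Int)) 1 := by
      have h1 : (((N + 1 : Nat) : Int)).natAbs < 2 ^ PySem.Int.bitLength ((N + 1 : Nat) : Int) :=
        PySem.Int.lt_two_pow_bitLength _
      have h2 : (((N + 1 : Nat) : Int)).natAbs = N + 1 := Int.natAbs_natCast _
      have h3 : (2 : Nat) ^ PySem.Int.bitLength ((N + 1 : Nat) : Int)
          ≤ 2 ^ max (PySem.Int.bitLength ((N + 1 : Nat) : Int)) 1 :=
        Nat.pow_le_pow_right (by norm_num) (le_max_left _ _)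
      omega
    rw [pvPows, pvCntEval]
    refine PySem.List.foldl_congr_mem _ _ _ _ (fun acc x hx => ?_)
    rw [PySem.List.mem_pyRange_one] at hx
    obtain ⟨X, rfl⟩ := Int.eq_ofNat_of_zero_le hx.1
    rw [pvInnerA (N + 1) X, pvGauss N, pvInnerB _ (N + 1) X,
      pvAndSum_from_counts _ (N + 1) X hMB]
    have key := pvXorSum_identity (N + 1) X
    have hcond : ((((pvXorSum (N + 1) X : Nat) : Int)) == ((pvIdSum (N + 1) : Nat) : Int))
        = ((((N + 1 : Nat) : Int)) * ((X : Nat) : Int) == 2 * ((pvAndSum (N + 1) X : Nat) : Int)) := by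
      rw [Bool.eq_iff_iff, beq_iff_eq, beq_iff_eq]
      constructor
      · intro h
        have h' : pvXorSum (N + 1) X = pvIdSum (N + 1) := by exact_mod_cast h
        have h2 : (N + 1) * X = 2 * pvAndSum (N + 1) X := by omega
        exact_mod_cast h2
      · intro h
        have h' : (N + 1) * X = 2 * pvAndSum (N + 1) X := by exact_mod_cast h
        have h2 : pvXorSum (N + 1) X = pvIdSum (N + 1) := by omega
        exact_mod_cast h2
    rw [hcond]
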